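-- pv_equiv track=rewrite | github.com/DanielIshi/YT-to-H5P-Pipeline | tests/test_learning_path_mix.py | check_didactic_order
-- ===== SOURCE A (Python) =====
-- from typing import List, Dict, Any
--
-- def check_didactic_order(activities: List[Dict], config: Dict[str, Any]) -> bool:
--     """
--     Verify didactic order: passive before active, summary at end.
--
--     Args:
--         activities: List of activity dicts
--         config: Milestone configuration
--
--     Returns:
--         True if order is didactically correct
--     """
--     if not activities:
--         return False
--
--     passive_types = config["phases"].get("passive", {}).get("types", [])
--     active_types = config["phases"].get("active", {}).get("types", [])
--
--     # Summary must be last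
--     if activities[-1].get("content_type") != "summary":
--         return False
--
--     # Find first active and last passive indices
--     first_active_idx = next(
--         (i for i, a in enumerate(activities) if a.get("content_type") in active_types),
--         len(activities)
--     )
--     last_passive_idx = max(
--         (i for i, a in enumerate(activities) if a.get("content_type") in passive_types),
--         default=-1
--     )
--
--     # Allow some overlap (tolerance of 2 positions)
--     return last_passive_idx < first_active_idx + 2
-- ===== SOURCE B (Python) =====
-- from typing import List, Dict, Any
--
-- def check_didactic_order(activities: List[Dict], config: Dict[str, Any]) -> bool:
--     """Single early-exit pass: fail as soon as a passive activity appears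
--     two or more positions after some active activity."""
--     if not activities:
--         return False
--
--     phases = config["phases"]
--     passive_types = phases.get("passive", {}).get("types", [])
--     active_types = phases.get("active", {}).get("types", [])
--
--     if activities[-1].get("content_type") != "summary":
--         return False
--
--     # window[k] = whether the activity (2-k) positions back was active
--     window = [False, False]
--     active_before = False  # an active activity occurred >= 2 positions earlier
--     for a in activities:
--         active_before = active_before or window[0]
--         t = a.get("content_type")
--         if active_before and t in passive_types:
--             return False
--         window = [window[1], t in active_types]
--     return True
-- ===== Notes on version B (the rewrite author's own statement) =====
-- stated objective: alternative
-- what changed: A computes the first-active index with next(...) and the last-passive index with max(...) over two full enumerations and then compares them; B does one short-circuiting pass with a two-slot delay window that rejects as soon as a passive activity appears two or more positions after an active one.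
import Mathlib
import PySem

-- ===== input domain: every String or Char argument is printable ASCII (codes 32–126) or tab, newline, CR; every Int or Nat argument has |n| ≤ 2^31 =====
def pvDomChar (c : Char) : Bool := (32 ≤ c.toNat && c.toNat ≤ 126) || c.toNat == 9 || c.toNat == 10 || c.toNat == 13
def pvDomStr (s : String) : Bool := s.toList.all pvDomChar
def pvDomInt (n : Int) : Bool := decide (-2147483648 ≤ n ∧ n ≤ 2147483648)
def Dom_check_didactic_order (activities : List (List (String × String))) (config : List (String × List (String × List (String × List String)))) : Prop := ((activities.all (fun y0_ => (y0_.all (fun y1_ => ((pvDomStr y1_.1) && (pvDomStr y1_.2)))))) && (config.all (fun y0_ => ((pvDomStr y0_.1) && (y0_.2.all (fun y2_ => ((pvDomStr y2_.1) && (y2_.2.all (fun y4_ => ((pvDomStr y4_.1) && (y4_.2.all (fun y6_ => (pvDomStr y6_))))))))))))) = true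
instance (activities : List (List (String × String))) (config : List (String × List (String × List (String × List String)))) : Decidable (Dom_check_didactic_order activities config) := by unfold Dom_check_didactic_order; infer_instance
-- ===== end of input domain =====

-- B replaces A's two whole-list index computations (first-active via `next`, last-passive
-- via `max`) by one short-circuiting pass with a two-slot delay window; objective: alternative.

-- shared dict-access / membership helpers (both Pythons perform these same `.get` / `in` steps)
def alGet? {ν : Type} (l : List (String × ν)) (k : String) : Option ν :=
  (l.find? (fun p => p.1 == k)).map (·.2)

def pvTypes (phases : List (String × List (String × List String))) (name : String) : List String :=
  match alGet? phases name with
  | some d => (alGet? d "types").getD []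
  | none => []

def pvCT (a : List (String × String)) : Option String := alGet? a "content_type"

def pvMem (t : Option String) (types : List String) : Bool :=
  match t with
  | some s => types.contains s
  | none => false

-- ===== PORT A =====
-- next((i for i, a in enumerate(activities) if a.get("content_type") in active_types), len(activities))
def pvFaAux (active : List String) : List (List (String × String)) → Nat → Option Nat
  | [], _ => none
  | a :: rest, i => if pvMem (pvCT a) active then some i else pvFaAux active rest (i + 1)

-- max((i for i, a in enumerate(activities) if a.get("content_type") in passive_types), default=-1)
def pvLpAux (passive : List String) : List (List (String × String)) → Nat → Int → Int
  | [], _, m => m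
  | a :: rest, i, m =>
      pvLpAux passive rest (i + 1) (if pvMem (pvCT a) passive then max m (i : Int) else m)

def check_didactic_order (activities : List (List (String × String))) (config : List (String × List (String × List (String × List String)))) : Bool :=
  if activities.isEmpty then false
  else
    match alGet? config "phases" with
    | none => false  -- Python raises KeyError here; excluded by Pre_
    | some phases =>
      match PySem.List.pyGet? activities (-1) with
      | none => false  -- unreachable: activities nonempty
      | some last =>
        if pvCT last ≠ some "summary" then false
        else
          decide (pvLpAux (pvTypes phases "passive") activities 0 (-1) <
            (match pvFaAux (pvTypes phases "active") activities 0 with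
             | some i => (i : Int)
             | none => (activities.length : Int)) + 2)

-- ===== PORT B =====
-- one early-exit pass; w0/w1 = delay window, ab = active_before
def pvLoop (passive active : List String) : List (List (String × String)) → Bool → Bool → Bool → Bool
  | [], _, _, _ => true
  | a :: rest, w0, w1, ab =>
      let ab' := ab || w0
      let t := pvCT a
      if ab' && pvMem t passive then false
      else pvLoop passive active rest w1 (pvMem t active) ab'

def check_didactic_order_alt (activities : List (List (String × String))) (config : List (String × List (String × List (String × List String)))) : Bool :=
  if activities.isEmpty then false
  else
    match alGet? config "phases" with
    | none => false  -- Python raises KeyError here; excluded by Pre_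
    | some phases =>
      match PySem.List.pyGet? activities (-1) with
      | none => false
      | some last =>
        if pvCT last ≠ some "summary" then false
        else
          pvLoop (pvTypes phases "passive") (pvTypes phases "active") activities false false false

-- ===== PRECONDITION & SPEC =====
-- Pre_ excludes exactly the inputs where Python raises KeyError (nonempty activities with a
-- config lacking the "phases" key); both A and B raise there.
def Pre_check_didactic_order (activities : List (List (String × String))) (config : List (String × List (String × List (String × List String)))) : Prop :=
  activities = [] ∨ (alGet? config "phases").isSome = true
instance (activities : List (List (String × String))) (config : List (String × List (String × List (String × List String)))) : Decidable (Pre_check_didactic_order activities config) := by unfold Pre_check_didactic_order; infer_instance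

def pvWitness_check_didactic_order : (List (List (String × String))) × (List (String × List (String × List (String × List String)))) :=
  ([[("content_type", "summary")]], [("phases", [])])

def Spec_check_didactic_order (activities : List (List (String × String))) (config : List (String × List (String × List (String × List String)))) (out : Bool) : Prop := out = check_didactic_order_alt activities config
instance (activities : List (List (String × String))) (config : List (String × List (String × List (String × List String)))) (out : Bool) : Decidable (Spec_check_didactic_order activities config out) := by unfold Spec_check_didactic_order; infer_instance

-- ===== CLAIM (what is proved, stated in full; the proofs are below) =====
def Claim_equal_check_didactic_order : Prop := ∀ (activities : List (List (String × String))) (config : List (String × List (String × List (String × List String)))), Dom_check_didactic_order activities config → Pre_check_didactic_order activities config → Spec_check_didactic_order activities config (check_didactic_order activities config)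

-- ===== LEMMAS AND PROOFS =====

-- "some passive activity sits ≥ 2 positions after some active activity"
def pvBad (p q : List String) (xs : List (List (String × String))) : Prop :=
  ∃ i j : Nat, j + 2 ≤ i ∧
    (∃ a, xs[i]? = some a ∧ pvMem (pvCT a) p = true) ∧
    (∃ b, xs[j]? = some b ∧ pvMem (pvCT b) q = true)

theorem pvLoop_iff (p q : List String) :
    ∀ (xs : List (List (String × String))) (w0 w1 ab : Bool),
      pvLoop p q xs w0 w1 ab = true ↔
        ∀ i a, xs[i]? = some a → pvMem (pvCT a) p = true →
          ¬(ab = true ∨ w0 = true ∨ (w1 = true ∧ 1 ≤ i) ∨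
            ∃ j b, j + 2 ≤ i ∧ xs[j]? = some b ∧ pvMem (pvCT b) q = true) := by
  intro xs
  induction xs with
  | nil => intro w0 w1 ab; simp [pvLoop]
  | cons a rest ih =>
    intro w0 w1 ab
    by_cases h : ((ab || w0) && pvMem (pvCT a) p) = true
    · simp only [pvLoop, h, if_true]
      constructor
      · intro hf; exact absurd hf (by simp)
      · intro hall
        exfalso
        obtain ⟨hor, hmem⟩ : ((ab || w0) = true) ∧ pvMem (pvCT a) p = true := by
          simpa [Bool.and_eq_true] using h
        apply hall 0 a (by simp) hmem
        rcases (by simpa using hor : ab = true ∨ w0 = true) with hab | hw0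
        · exact Or.inl hab
        · exact Or.inr (Or.inl hw0)
    · simp only [pvLoop]
      rw [if_neg h, ih w1 (pvMem (pvCT a) q) (ab || w0)]
      constructor
      · -- rest-statement (with shifted flags) → cons-statement
        intro hall i b hget hp hbad
        cases i with
        | zero =>
          simp only [List.getElem?_cons_zero, Option.some.injEq] at hget
          subst hget
          rcases hbad with hab | hw0 | ⟨_, h1⟩ | ⟨j, c, hj2, _, _⟩
          · exact h (by simp [hab, hp])
          · exact h (by simp [hw0, hp])
          · omega
          · omega
        | succ i' =>
          simp only [List.getElem?_cons_succ] at hget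
          apply hall i' b hget hp
          rcases hbad with hab | hw0 | ⟨hw1, _⟩ | ⟨j, c, hj2, hjget, hq⟩
          · exact Or.inl (by simp [hab])
          · exact Or.inl (by simp [hw0])
          · exact Or.inr (Or.inl hw1)
          · cases j with
            | zero =>
              simp only [List.getElem?_cons_zero, Option.some.injEq] at hjget
              subst hjget
              exact Or.inr (Or.inr (Or.inl ⟨hq, by omega⟩))
            | succ j' =>
              simp only [List.getElem?_cons_succ] at hjget
              exact Or.inr (Or.inr (Or.inr ⟨j', c, by omega, hjget, hq⟩))
      · -- cons-statement → rest-statement (with shifted flags)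
        intro hall i b hget hp hbad
        apply hall (i + 1) b (by simpa using hget) hp
        rcases hbad with hab | hw1 | ⟨hqa, h1⟩ | ⟨j, c, hj2, hjget, hq⟩
        · rcases (by simpa using hab : ab = true ∨ w0 = true) with h1 | h2
          · exact Or.inl h1
          · exact Or.inr (Or.inl h2)
        · exact Or.inr (Or.inr (Or.inl ⟨hw1, by omega⟩))
        · exact Or.inr (Or.inr (Or.inr ⟨0, a, by omega, by simp, hqa⟩))
        · exact Or.inr (Or.inr (Or.inr ⟨j + 1, c, by omega, by simpa using hjget, hq⟩))

theorem pvFaAux_none (q : List String) :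
    ∀ (xs : List (List (String × String))) (k : Nat),
      pvFaAux q xs k = none ↔ ∀ (j : Nat) (b : List (String × String)), xs[j]? = some b → pvMem (pvCT b) q = false := by
  intro xs
  induction xs with
  | nil => intro k; simp [pvFaAux]
  | cons a rest ih =>
    intro k
    by_cases hm : pvMem (pvCT a) q = true
    · simp only [pvFaAux]
      rw [if_pos hm]
      constructor
      · intro hf; exact absurd hf (by simp)
      · intro hall; exact absurd (hall 0 a (by simp)) (by simp [hm])
    · simp only [pvFaAux]
      rw [if_neg hm, ih (k + 1)]
      constructor
      · intro hall j b hget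
        cases j with
        | zero =>
          simp only [List.getElem?_cons_zero, Option.some.injEq] at hget
          subst hget; exact Bool.eq_false_iff.mpr hm
        | succ j' => exact hall j' b (by simpa using hget)
      · intro hall j b hget; exact hall (j + 1) b (by simpa using hget)

theorem pvFaAux_some (q : List String) :
    ∀ (xs : List (List (String × String))) (k m : Nat),
      pvFaAux q xs k = some m →
        ∃ i b, m = k + i ∧ xs[i]? = some b ∧ pvMem (pvCT b) q = true ∧
          ∀ (j : Nat) (c : List (String × String)), j < i → xs[j]? = some c → pvMem (pvCT c) q = false := by
  intro xs
  induction xs with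
  | nil => intro k m h; simp [pvFaAux] at h
  | cons a rest ih =>
    intro k m h
    by_cases hm : pvMem (pvCT a) q = true
    · simp only [pvFaAux] at h
      rw [if_pos hm] at h
      simp only [Option.some.injEq] at h
      exact ⟨0, a, by omega, by simp, hm, fun j c hj _ => by omega⟩
    · simp only [pvFaAux] at h
      rw [if_neg hm] at h
      obtain ⟨i, b, hmi, hget, hq, hmin⟩ := ih (k + 1) m h
      refine ⟨i + 1, b, by omega, by simp only [List.getElem?_cons_succ]; exact hget, hq, ?_⟩
      intro j c hj hget'
      cases j with
      | zero =>
        simp only [List.getElem?_cons_zero, Option.some.injEq] at hget'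
        subst hget'; exact Bool.eq_false_iff.mpr hm
      | succ j' => exact hmin j' c (by omega) (by simpa using hget')

theorem pvLpAux_ge_init (p : List String) :
    ∀ (xs : List (List (String × String))) (k : Nat) (m : Int), m ≤ pvLpAux p xs k m := by
  intro xs
  induction xs with
  | nil => intro k m; simp [pvLpAux]
  | cons a rest ih =>
    intro k m
    by_cases hm : pvMem (pvCT a) p = true
    · simp only [pvLpAux]
      rw [if_pos hm]
      exact le_trans (le_max_left m (k : Int)) (ih (k + 1) _)
    · simp only [pvLpAux]; rw [if_neg hm]; exact ih (k + 1) m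

theorem pvLpAux_ge (p : List String) :
    ∀ (xs : List (List (String × String))) (k : Nat) (m : Int) (j : Nat) (a : List (String × String)),
      xs[j]? = some a → pvMem (pvCT a) p = true → (k : Int) + j ≤ pvLpAux p xs k m := by
  intro xs
  induction xs with
  | nil => intro k m j a hget _; simp at hget
  | cons b rest ih =>
    intro k m j a hget hp
    cases j with
    | zero =>
      simp only [List.getElem?_cons_zero, Option.some.injEq] at hget
      subst hget
      simp only [pvLpAux]
      rw [if_pos hp]
      have h1 : (k : Int) ≤ max m (k : Int) := le_max_right _ _
      have h2 := pvLpAux_ge_init p rest (k + 1) (max m (k : Int))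
      omega
    | succ j' =>
      simp only [List.getElem?_cons_succ] at hget
      have := ih (k + 1) (if pvMem (pvCT b) p then max m (k : Int) else m) j' a hget hp
      simp only [pvLpAux]
      push_cast at this ⊢
      omega

theorem pvLpAux_cases (p : List String) :
    ∀ (xs : List (List (String × String))) (k : Nat) (m : Int),
      pvLpAux p xs k m = m ∨
        ∃ (j : Nat) (a : List (String × String)), xs[j]? = some a ∧ pvMem (pvCT a) p = true ∧ pvLpAux p xs k m = (k : Int) + (j : Int) := by
  intro xs
  induction xs with
  | nil => intro k m; left; simp [pvLpAux]
  | cons a rest ih =>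
    intro k m
    by_cases hm : pvMem (pvCT a) p = true
    · simp only [pvLpAux]
      rw [if_pos hm]
      rcases ih (k + 1) (max m (k : Int)) with h | ⟨j, b, hget, hp, hval⟩
      · rcases max_choice m (k : Int) with hmax | hmax
        · left; rw [h, hmax]
        · right
          exact ⟨0, a, by simp, hm, by rw [h, hmax]; omega⟩
      · right
        refine ⟨j + 1, b, by simp only [List.getElem?_cons_succ]; exact hget, hp, ?_⟩
        rw [hval]; push_cast; omega
    · simp only [pvLpAux]
      rw [if_neg hm]
      rcases ih (k + 1) m with h | ⟨j, b, hget, hp, hval⟩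
      · left; exact h
      · right
        refine ⟨j + 1, b, by simp only [List.getElem?_cons_succ]; exact hget, hp, ?_⟩
        rw [hval]; push_cast; omega

theorem pvLoop_iff_bad (p q : List String) (xs : List (List (String × String))) :
    pvLoop p q xs false false false = true ↔ ¬ pvBad p q xs := by
  rw [pvLoop_iff]
  unfold pvBad
  constructor
  · rintro hall ⟨i, j, hij, ⟨a, ha, hp⟩, ⟨b, hb, hq⟩⟩
    exact hall i a ha hp (Or.inr (Or.inr (Or.inr ⟨j, b, hij, hb, hq⟩)))
  · rintro hnb i a ha hp (h | h | ⟨h, _⟩ | ⟨j, b, hj, hb, hq⟩)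
    · simp at h
    · simp at h
    · simp at h
    · exact hnb ⟨i, j, hj, ⟨a, ha, hp⟩, ⟨b, hb, hq⟩⟩

theorem pvA_iff_bad (p q : List String) (xs : List (List (String × String))) :
    (pvLpAux p xs 0 (-1) <
      (match pvFaAux q xs 0 with
       | some i => (i : Int)
       | none => (xs.length : Int)) + 2) ↔ ¬ pvBad p q xs := by
  cases hfa : pvFaAux q xs 0 with
  | none =>
    simp only
    constructor
    · rintro _ ⟨i, j, hij, ⟨a, ha, hp⟩, ⟨b, hb, hq⟩⟩
      exact absurd ((pvFaAux_none q xs 0).mp hfa j b hb) (by simp [hq])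
    · intro _
      rcases pvLpAux_cases p xs 0 (-1) with h | ⟨j, a, hget, hp, hval⟩
      · rw [h]
        have hnn : (0 : Int) ≤ (xs.length : Int) := Int.natCast_nonneg _
        omega
      · have hj : j < xs.length := by
          by_contra hge
          rw [List.getElem?_eq_none (by omega)] at hget
          simp at hget
        rw [hval]
        have hnn : ((j : Int)) < (xs.length : Int) := by exact_mod_cast hj
        omega
  | some m =>
    obtain ⟨i₀, b₀, hm0, hget₀, hq₀, hmin⟩ := pvFaAux_some q xs 0 m hfa
    simp only
    constructor
    · rintro hlt ⟨i, j, hij, ⟨a, ha, hp⟩, ⟨b, hb, hq⟩⟩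
      have hj0 : i₀ ≤ j := by
        by_contra hlt'
        exact absurd (hmin j b (by omega) hb) (by simp [hq])
      have hi : (0 : Int) + i ≤ pvLpAux p xs 0 (-1) := pvLpAux_ge p xs 0 (-1) i a ha hp
      omega
    · intro hnb
      rcases pvLpAux_cases p xs 0 (-1) with h | ⟨j, a, hget, hp, hval⟩
      · rw [h]; omega
      · have hj : j < i₀ + 2 := by
          by_contra hge
          exact hnb ⟨j, i₀, by omega, ⟨a, hget, hp⟩, ⟨b₀, hget₀, hq₀⟩⟩
        rw [hval]; omega

theorem pvMain (p q : List String) (xs : List (List (String × String))) :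
    decide (pvLpAux p xs 0 (-1) <
      (match pvFaAux q xs 0 with
       | some i => (i : Int)
       | none => (xs.length : Int)) + 2)
      = pvLoop p q xs false false false := by
  rw [Bool.eq_iff_iff, decide_eq_true_iff, pvA_iff_bad, pvLoop_iff_bad]

-- ===== VERDICT (by name: the statement is the Claim_ definition above) =====
theorem check_didactic_order_spec : Claim_equal_check_didactic_order := by
  intro acts cfg _ _
  unfold Spec_check_didactic_order check_didactic_order check_didactic_order_alt
  by_cases he : acts.isEmpty
  · simp [he]
  · simp only [he, Bool.false_eq_true, if_false]
    cases hph : alGet? cfg "phases" with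
    | none => rfl
    | some phases =>
      cases hlast : PySem.List.pyGet? acts (-1) with
      | none => rfl
      | some last =>
        by_cases hs : pvCT last ≠ some "summary"
        · simp [hs]
        · simp only [hs, if_false]
          exact pvMain _ _ _
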